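-- pv_equiv track=rewrite | github.com/pacokwon/reddit-pushshift-crawler | praw_process.py | make_nested_map
-- ===== SOURCE A (Python) =====
-- def make_nested_map(data):
--     parent_map = dict()
--     nested_map = dict()
--
--     def record_nest(comment_id):
--         if comment_id in nested_map:
--             return
--
--         parent = parent_map[comment_id]
--         if parent == "":
--             nested_map[comment_id] = 0
--             return
--
--         if parent not in nested_map:
--             record_nest(parent)
--
--         nested_map[comment_id] = 1 + nested_map[parent]
--
--     for record in data:
--         parent_id = record["parent_id"]
--         if parent_id[1] == "3":
--             parent_map[record["id"]] = ""
--         else: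
--             parent_map[record["id"]] = parent_id[3:]
--
--     for record in data:
--         record_nest(record["id"])
--
--     return nested_map
-- ===== SOURCE B (Python) =====
-- def make_nested_map(data):
--     parent_map = {}
--     for record in data:
--         pid = record["parent_id"]
--         parent_map[record["id"]] = "" if pid[1] == "3" else pid[3:]
--
--     nested_map = {}
--     for record in data:
--         # chase parents, collecting the uncached chain, until a root or a cached depth
--         cur = record["id"]
--         path = []
--         while True:
--             if cur in nested_map:
--                 base = nested_map[cur]
--                 break
--             parent = parent_map[cur]
--             if parent == "":
--                 path.append(cur)
--                 base = -1
--                 break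
--             path.append(cur)
--             cur = parent
--         # assign consecutive depths ancestor-first, purely arithmetically
--         depth = base
--         for node in reversed(path):
--             depth += 1
--             nested_map[node] = depth
--     return nested_map
-- ===== Notes on version B (the rewrite author's own statement) =====
-- stated objective: alternative
-- what changed: Replaces the recursive, dict-mutating record_nest with a two-phase per-record computation: a pure pointer-chase collects the uncached ancestor chain and the base depth, then a separate arithmetic loop assigns consecutive depths ancestor-first with no further parent lookups and no recursion.
import Mathlib
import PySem

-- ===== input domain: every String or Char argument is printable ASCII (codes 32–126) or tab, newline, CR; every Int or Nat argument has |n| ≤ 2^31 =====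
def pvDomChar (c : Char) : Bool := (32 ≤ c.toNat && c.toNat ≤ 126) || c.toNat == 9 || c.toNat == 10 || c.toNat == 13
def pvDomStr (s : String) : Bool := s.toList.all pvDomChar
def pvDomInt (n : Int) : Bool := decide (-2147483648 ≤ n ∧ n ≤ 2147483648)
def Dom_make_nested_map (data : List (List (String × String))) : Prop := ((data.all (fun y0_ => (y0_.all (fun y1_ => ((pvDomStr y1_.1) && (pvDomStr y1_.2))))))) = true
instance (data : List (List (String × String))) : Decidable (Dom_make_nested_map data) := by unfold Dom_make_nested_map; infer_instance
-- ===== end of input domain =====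

-- B replaces A's recursive, dict-mutating record_nest with a pure pointer-chase that collects
-- the uncached ancestor chain plus a base depth, followed by an arithmetic assignment loop;
-- equivalence is about the RETURN value (the Python functions mutate only their own local dicts).

-- ===== PORT A =====
-- A's first loop: builds parent_map; none = a KeyError (missing "parent_id"/"id") or
-- IndexError (parent_id shorter than 2) raised by the loop
-- A's parent-map loop body, named so the builders can be compared
def pmStepA (acc : Option (PySem.Dict String String)) (record : List (String × String)) :
    Option (PySem.Dict String String) :=
  match acc with
  | none => none
  | some pm =>
    match (PySem.Dict.mk record).get? "parent_id" with
    | none => none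
    | some pid =>
      match PySem.Str.pyGet? pid 1 with
      | none => none
      | some c =>
        match (PySem.Dict.mk record).get? "id" with
        | none => none
        | some rid =>
          if c == '3' then some (pm.insert rid "")
          else some (pm.insert rid (PySem.Str.slice pid (some 3) none))

def pvBuildParentMap (data : List (List (String × String))) : Option (PySem.Dict String String) :=
  data.foldl pmStepA (some PySem.Dict.empty)

-- A's recursive record_nest; fuel bounds the recursion depth (none = KeyError or fuel exhausted;
-- under Pre_ the fuel data.length+1 always suffices)
def recordNestA (pm : PySem.Dict String String) : Nat → String → PySem.Dict String Int → Option (PySem.Dict String Int)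
  | 0, _, _ => none
  | fuel+1, cid, nm =>
    if (nm.get? cid).isSome then some nm
    else
      match pm.get? cid with
      | none => none
      | some parent =>
        if parent == "" then some (nm.insert cid 0)
        else
          match (if (nm.get? parent).isSome then some nm else recordNestA pm fuel parent nm) with
          | none => none
          | some nm' =>
            match nm'.get? parent with
            | none => none
            | some d => some (nm'.insert cid (1 + d))

def stepA (pm : PySem.Dict String String) (fuel : Nat)
    (acc : Option (PySem.Dict String Int)) (record : List (String × String)) :
    Option (PySem.Dict String Int) :=
  match acc with
  | none => none
  | some nm =>
    match (PySem.Dict.mk record).get? "id" with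
    | none => none
    | some cid => recordNestA pm fuel cid nm

def make_nested_map (data : List (List (String × String))) : List (String × Int) :=
  match pvBuildParentMap data with
  | none => []
  | some pm =>
    match data.foldl (stepA pm (data.length + 1)) (some PySem.Dict.empty) with
    | none => []
    | some nm => nm.items

-- ===== PORT B =====
-- B's first loop as structural recursion (same lookups and exceptions as A's: none = error)
def buildPMB : List (List (String × String)) → PySem.Dict String String → Option (PySem.Dict String String)
  | [], pm => some pm
  | r :: rest, pm =>
    match (PySem.Dict.mk r).get? "parent_id" with
    | none => none
    | some pid =>
      match PySem.Str.pyGet? pid 1, (PySem.Dict.mk r).get? "id" with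
      | some c, some rid =>
          buildPMB rest (pm.insert rid (if c == '3' then "" else PySem.Str.slice pid (some 3) none))
      | _, _ => none

-- B's inner while loop: pure pointer-chase collecting the uncached chain (cons-accumulated, so
-- the list is ancestor-first = Python's reversed(path)) and the base depth; inserts nothing
def chaseB (pm : PySem.Dict String String) (nm : PySem.Dict String Int) :
    Nat → String → List String → Option (List String × Int)
  | 0, _, _ => none
  | f+1, cur, acc =>
    match nm.get? cur with
    | some d => some (acc, d)
    | none =>
      match pm.get? cur with
      | none => none
      | some parent =>
        if parent == "" then some (cur :: acc, -1)
        else chaseB pm nm f parent (cur :: acc)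

-- B's assignment loop: consecutive depths ancestor-first, pure arithmetic, no lookups
def assignB : List String → Int → PySem.Dict String Int → PySem.Dict String Int
  | [], _, nm => nm
  | node :: rest, depth, nm => assignB rest (depth + 1) (nm.insert node (depth + 1))

-- B's second outer loop as structural recursion over the records
def loopB (pm : PySem.Dict String String) (fuel : Nat) :
    List (List (String × String)) → PySem.Dict String Int → Option (PySem.Dict String Int)
  | [], nm => some nm
  | r :: rest, nm =>
    match (PySem.Dict.mk r).get? "id" with
    | none => none
    | some cid =>
      match chaseB pm nm fuel cid [] with
      | none => none
      | some (path, base) => loopB pm fuel rest (assignB path base nm)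

def make_nested_map_alt (data : List (List (String × String))) : List (String × Int) :=
  match buildPMB data PySem.Dict.empty with
  | none => []
  | some pm =>
    match loopB pm (data.length + 1) data PySem.Dict.empty with
    | none => []
    | some nm => nm.items

-- ===== PRECONDITION & SPEC =====
-- bounded reachability in the INPUT's parent graph: following parent links from cid, a root
-- ("") is reached within the given number of steps, every link present in pm. This is a shape
-- condition on the input data (the parent relation is total and acyclic), not a re-run of either
-- algorithm; the bound data.length+1 covers every acyclic chain, so it imposes no extra limit.
def pvChainOk (pm : PySem.Dict String String) : Nat → String → Bool
  | 0, _ => false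
  | f+1, cid =>
    match pm.get? cid with
    | none => false
    | some p => if p == "" then true else pvChainOk pm f p

-- Pre_ excludes exactly the inputs where the Python A raises: a record without "id"/"parent_id",
-- a parent_id shorter than 2 (IndexError), a parent id absent from the thread (KeyError), or a
-- cyclic parent chain (RecursionError).
def Pre_make_nested_map (data : List (List (String × String))) : Prop :=
  (match pvBuildParentMap data with
   | none => false
   | some pm =>
     data.all (fun r =>
       match (PySem.Dict.mk r).get? "id" with
       | none => false
       | some cid => pvChainOk pm (data.length + 1) cid)) = true
instance (data : List (List (String × String))) : Decidable (Pre_make_nested_map data) := by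
  unfold Pre_make_nested_map; infer_instance

def pvWitness_make_nested_map : (List (List (String × String))) :=
  [[("id", "a"), ("parent_id", "t3_xyz")], [("id", "b"), ("parent_id", "t1_a")]]

def Spec_make_nested_map (data : List (List (String × String))) (out : List (String × Int)) : Prop := out = make_nested_map_alt data
instance (data : List (List (String × String))) (out : List (String × Int)) : Decidable (Spec_make_nested_map data out) := by unfold Spec_make_nested_map; infer_instance

-- ===== CLAIM (what is proved, stated in full; the proofs are below) =====
def Claim_equal_make_nested_map : Prop := ∀ (data : List (List (String × String))), Dom_make_nested_map data → Pre_make_nested_map data → Spec_make_nested_map data (make_nested_map data)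

-- ===== LEMMAS AND PROOFS =====

-- the two parent-map builders agree
theorem buildPMB_eq : ∀ (l : List (List (String × String))) (pm : PySem.Dict String String),
    buildPMB l pm = l.foldl pmStepA (some pm) := by
  intro l
  induction l with
  | nil => intro pm; rfl
  | cons r rest ih =>
    intro pm
    have hnone : ∀ (l' : List (List (String × String))), l'.foldl pmStepA none = none := by
      intro l'; induction l' with
      | nil => rfl
      | cons x xs ihx => simpa [pmStepA] using ihx
    rw [List.foldl_cons, buildPMB]
    cases hp : (PySem.Dict.mk r).get? "parent_id" with
    | none => simp only [pmStepA, hp]; exact (hnone rest).symm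
    | some pid =>
      cases hc : PySem.Str.pyGet? pid 1 with
      | none => simp only [pmStepA, hp, hc]; exact (hnone rest).symm
      | some c =>
        cases hid : (PySem.Dict.mk r).get? "id" with
        | none => simp only [pmStepA, hp, hc, hid]; exact (hnone rest).symm
        | some rid =>
          simp only [pmStepA, hp, hc, hid]
          by_cases h3 : c = '3'
          · simp [h3, ih]
          · simp [h3, ih]

-- cons-accumulation only appends the accumulator to the collected chain
theorem chaseB_acc (pm : PySem.Dict String String) (nm : PySem.Dict String Int) :
    ∀ (f : Nat) (cur : String) (acc : List String),
      chaseB pm nm f cur acc =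
        (chaseB pm nm f cur []).map (fun qb => (qb.1 ++ acc, qb.2)) := by
  intro f
  induction f with
  | zero => intro cur acc; rfl
  | succ f ih =>
    intro cur acc
    rw [chaseB, chaseB]
    cases hd : nm.get? cur with
    | some d => simp
    | none =>
      cases hp : pm.get? cur with
      | none => simp
      | some parent =>
        by_cases h2 : parent = ""
        · simp [h2]
        · have h2' : ¬ ((parent == "") = true) := by simp [h2]
          dsimp only
          rw [if_neg h2', if_neg h2']
          rw [ih parent (cur :: acc), ih parent [cur]]
          cases chaseB pm nm f parent [] with
          | none => rfl
          | some qb => simp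

-- assigning an appended chain = assigning the first part, then the rest from the shifted base
theorem assignB_append : ∀ (q r : List String) (b : Int) (nm : PySem.Dict String Int),
    assignB (q ++ r) b nm = assignB r (b + q.length) (assignB q b nm) := by
  intro q
  induction q with
  | nil => intro r b nm; simp [assignB]
  | cons n q' ih =>
    intro r b nm
    have hb : b + 1 + (q'.length : Int) = b + ((q'.length : Int) + 1) := by ring
    simp only [List.cons_append, assignB, ih, List.length_cons]
    rw [hb]
    push_cast
    ring_nf

-- the chase-then-assign pair computes exactly A's recursion, and records cid's depth
theorem chaseB_sound (pm : PySem.Dict String String) :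
    ∀ (f : Nat) (cid : String) (nm : PySem.Dict String Int) (p : List String) (b : Int),
      chaseB pm nm f cid [] = some (p, b) →
      recordNestA pm f cid nm = some (assignB p b nm) ∧
      (assignB p b nm).get? cid = some (b + p.length) := by
  intro f
  induction f with
  | zero => intro cid nm p b h; simp [chaseB] at h
  | succ f ih =>
    intro cid nm p b h
    rw [chaseB] at h
    rw [recordNestA]
    cases hd : nm.get? cid with
    | some d =>
      rw [hd] at h
      simp at h
      obtain ⟨hp, hb⟩ := h
      subst hp; subst hb
      simp [assignB, hd]
    | none =>
      rw [hd] at h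
      dsimp only at h
      simp only [Option.isSome_none, Bool.false_eq_true, if_false]
      cases hp : pm.get? cid with
      | none => rw [hp] at h; simp at h
      | some parent =>
        rw [hp] at h
        dsimp only at h ⊢
        by_cases h2 : parent = ""
        · simp only [h2] at h ⊢
          simp at h
          obtain ⟨hpp, hbb⟩ := h
          subst hpp; subst hbb
          constructor
          · simp [assignB]
          · simp [assignB, PySem.Dict.get?_insert_self]
        · have h2' : ¬ ((parent == "") = true) := by simp [h2]
          rw [if_neg h2'] at h ⊢
          rw [chaseB_acc pm nm f parent [cid]] at h
          cases hq : chaseB pm nm f parent [] with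
          | none => rw [hq] at h; simp at h
          | some qb =>
            obtain ⟨q, b'⟩ := qb
            rw [hq] at h
            simp only [Option.map_some, Option.some_inj, Prod.mk.injEq] at h
            obtain ⟨hpq, hbb⟩ := h
            subst hbb
            subst hpq
            obtain ⟨hrec, hget⟩ := ih parent nm q b' hq
            by_cases h3 : ((nm.get? parent).isSome = true)
            · -- parent cached: q = [] and b' = nm[parent]
              obtain ⟨d, hd'⟩ := Option.isSome_iff_exists.mp h3
              have hq0 : q = [] ∧ b' = d := by
                cases f with
                | zero => simp [chaseB] at hq
                | succ g =>
                  rw [chaseB, hd'] at hq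
                  simp at hq
                  exact ⟨hq.1, hq.2.symm⟩
              obtain ⟨hq1, hb1⟩ := hq0
              subst hq1; subst hb1
              rw [if_pos h3]
              dsimp only
              rw [hd']
              dsimp only [assignB, List.nil_append]
              constructor
              · rw [Int.add_comm 1 b']
              · simp [PySem.Dict.get?_insert_self]
            · -- parent not cached: use the recursive result
              rw [if_neg h3, hrec]
              dsimp only
              rw [hget]
              dsimp only
              rw [assignB_append]
              dsimp only [assignB]
              constructor
              · rw [Int.add_comm 1 (b' + (q.length : Int))]
              · simp [PySem.Dict.get?_insert_self]
                ring

-- a terminating parent chain lets the chase succeed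
theorem chaseB_isSome_of_chainOk (pm : PySem.Dict String String) :
    ∀ (f : Nat) (cid : String), pvChainOk pm f cid = true →
      ∀ (acc : List String) (nm : PySem.Dict String Int),
        ∃ r, chaseB pm nm f cid acc = some r := by
  intro f
  induction f with
  | zero => intro cid hc; simp [pvChainOk] at hc
  | succ f ih =>
    intro cid hc acc nm
    rw [pvChainOk] at hc
    rw [chaseB]
    cases hd : nm.get? cid with
    | some d => exact ⟨(acc, d), rfl⟩
    | none =>
      cases hp : pm.get? cid with
      | none => rw [hp] at hc; simp at hc
      | some parent =>
        rw [hp] at hc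
        dsimp only at hc ⊢
        by_cases h2 : parent = ""
        · exact ⟨(cid :: acc, -1), by simp [h2]⟩
        · have h2' : ¬ ((parent == "") = true) := by simp [h2]
          rw [if_neg h2'] at hc ⊢
          exact ih parent hc (cid :: acc) nm

-- the two outer loops agree record by record
theorem foldl_stepA_eq_loopB (pm : PySem.Dict String String) (N : Nat) :
    ∀ (l : List (List (String × String))),
      (l.all (fun r =>
        match (PySem.Dict.mk r).get? "id" with
        | none => false
        | some cid => pvChainOk pm N cid)) = true →
      ∀ nm : PySem.Dict String Int,
        l.foldl (stepA pm N) (some nm) = loopB pm N l nm := by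
  intro l
  induction l with
  | nil => intro _ nm; rfl
  | cons r l ih =>
    intro hall nm
    rw [List.all_cons, Bool.and_eq_true] at hall
    obtain ⟨hr, hl⟩ := hall
    cases hid : (PySem.Dict.mk r).get? "id" with
    | none => simp [hid] at hr
    | some cid =>
      rw [hid] at hr
      obtain ⟨⟨p, b⟩, hchase⟩ := chaseB_isSome_of_chainOk pm N cid hr [] nm
      obtain ⟨hrec, _⟩ := chaseB_sound pm N cid nm p b hchase
      have hstepA : stepA pm N (some nm) r = some (assignB p b nm) := by
        simp [stepA, hid, hrec]
      rw [List.foldl_cons, hstepA, loopB, hid]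
      dsimp only
      rw [hchase]
      exact ih hl (assignB p b nm)

-- ===== VERDICT (by name: the statement is the Claim_ definition above) =====
theorem make_nested_map_spec : Claim_equal_make_nested_map := by
  intro data _ hpre
  unfold Spec_make_nested_map make_nested_map make_nested_map_alt
  unfold Pre_make_nested_map at hpre
  rw [buildPMB_eq data PySem.Dict.empty]
  rw [show List.foldl pmStepA (some PySem.Dict.empty) data = pvBuildParentMap data from rfl]
  cases hpm : pvBuildParentMap data with
  | none => rw [hpm] at hpre
  | some pm =>
    rw [hpm] at hpre
    dsimp only at hpre
    dsimp only
    rw [foldl_stepA_eq_loopB pm (data.length + 1) data hpre PySem.Dict.empty]
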